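-- pv_equiv track=rewrite | github.com/KingaBunkowska/Pygame | Tic-Tac-Toe/main.py | valid_name
-- ===== SOURCE A (Python) =====
-- def valid_name(name):
--     result = ""
--     for letter in name:
--         if letter != "_":
--             result += letter
--         elif letter == "_" and result != "":
--             return result
--     return result
-- ===== SOURCE B (Python) =====
-- def valid_name(name):
--     return name.lstrip("_").split("_")[0]
-- ===== Notes on version B (the rewrite author's own statement) =====
-- stated objective: simpler
-- what changed: replaces the per-character accumulation loop with early return by a one-line whole-string lstrip of leading underscores followed by split on underscore, taking the first segment
import Mathlib
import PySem

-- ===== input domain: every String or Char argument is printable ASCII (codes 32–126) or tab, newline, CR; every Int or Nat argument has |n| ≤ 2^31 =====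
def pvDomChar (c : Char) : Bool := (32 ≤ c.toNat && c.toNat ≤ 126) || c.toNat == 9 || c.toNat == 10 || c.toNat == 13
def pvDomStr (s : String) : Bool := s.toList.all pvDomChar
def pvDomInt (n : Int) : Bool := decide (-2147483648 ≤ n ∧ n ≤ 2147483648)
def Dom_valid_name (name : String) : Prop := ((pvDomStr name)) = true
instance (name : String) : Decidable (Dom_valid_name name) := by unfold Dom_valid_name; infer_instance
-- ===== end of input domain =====

-- B replaces A's per-character accumulation loop (with early return) by whole-string
-- lstrip("_") + split("_")[0]; objective: simpler. Both total, identical on all strings.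

-- ===== PORT A =====
-- the loop over the characters of `name`; `acc` is `result` (a string built char by char,
-- kept as List Char; `acc ++ [c]` is `result += letter`)
def validNameGo : List Char → List Char → List Char
  | [], acc => acc
  | c :: rest, acc =>
      if c ≠ '_' then validNameGo rest (acc ++ [c])
      else if acc ≠ [] then acc
      else validNameGo rest acc

def valid_name (name : String) : String :=
  String.ofList (validNameGo name.toList [])

-- ===== PORT B =====
def valid_name_alt (name : String) : String :=
  -- name.lstrip("_"): drop the leading '_' characters (exact hand port of str.lstrip("_"))
  let stripped := String.ofList (name.toList.dropWhile (· == '_'))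
  -- stripped.split("_")[0]: sep ≠ "" so split? is some, and str.split never returns an
  -- empty list, so the defaults of getD/headD are never used
  ((PySem.Str.split? stripped "_").getD []).headD ""

-- ===== PRECONDITION & SPEC =====
def Spec_valid_name (name : String) (out : String) : Prop := out = valid_name_alt name
instance (name : String) (out : String) : Decidable (Spec_valid_name name out) := by unfold Spec_valid_name; infer_instance

-- ===== CLAIM (what is proved, stated in full; the proofs are below) =====
def Claim_equal_valid_name : Prop := ∀ (name : String), Dom_valid_name name → Spec_valid_name name (valid_name name)

-- ===== LEMMAS AND PROOFS =====

-- A's loop once `result` is nonempty: it appends chars until the first '_' (or the end)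
theorem validNameGo_nonempty (l acc : List Char) (h : acc ≠ []) :
    validNameGo l acc = acc ++ l.takeWhile (fun c => c != '_') := by
  induction l generalizing acc with
  | nil => simp [validNameGo]
  | cons c rest ih =>
      by_cases hc : c = '_'
      · subst hc; simp [validNameGo, h]
      · simp only [validNameGo, if_pos (by exact hc), List.takeWhile_cons]
        rw [ih _ (by simp)]
        simp [hc]

-- A's loop from an empty `result`: skip leading '_', then take until the next '_'
theorem validNameGo_empty (l : List Char) :
    validNameGo l [] = (l.dropWhile (· == '_')).takeWhile (fun c => c != '_') := by
  induction l with
  | nil => simp [validNameGo]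
  | cons c rest ih =>
      by_cases hc : c = '_'
      · subst hc; simpa [validNameGo, List.dropWhile_cons] using ih
      · simp only [validNameGo, if_pos (by exact hc), List.dropWhile_cons]
        rw [validNameGo_nonempty _ _ (by simp)]
        simp [hc]

-- splitOn.go: once the accumulator is nonempty, the first piece of the result is fixed
theorem splitOnGo_head_snoc (sep : List Char) (fuel : Nat) (l cur : List Char)
    (acc : List (List Char)) (a : List Char) :
    (PySem.Chars.splitOn.go sep fuel l cur (acc ++ [a])).head? = some a := by
  induction fuel generalizing l cur acc with
  | zero => simp [PySem.Chars.splitOn.go]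
  | succ f ih =>
      cases l with
      | nil => simp [PySem.Chars.splitOn.go]
      | cons c rest =>
          rw [PySem.Chars.splitOn.go]
          split
          · simpa [List.cons_append] using
              ih (List.drop sep.length (c :: rest)) [] (cur.reverse :: acc)
          · exact ih rest (c :: cur) acc

-- splitOn.go with sep = "_" and empty accumulator: the first piece is cur.reverse ++ takeWhile
theorem splitOnGo_head (fuel : Nat) (l cur : List Char) (h : l.length ≤ fuel) :
    (PySem.Chars.splitOn.go ['_'] fuel l cur []).head? =
      some (cur.reverse ++ l.takeWhile (fun c => c != '_')) := by
  induction l generalizing fuel cur with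
  | nil => cases fuel <;> simp [PySem.Chars.splitOn.go]
  | cons c rest ih =>
      cases fuel with
      | zero => simp at h
      | succ f =>
          rw [PySem.Chars.splitOn.go]
          by_cases hc : c = '_'
          · subst hc
            simp only [List.isPrefixOf, Bool.and_true, beq_self_eq_true,
              if_pos]
            have := splitOnGo_head_snoc ['_'] f (List.drop 1 ('_' :: rest)) [] [] cur.reverse
            simpa using this
          · have hpre : ['_'].isPrefixOf (c :: rest) = false := by
              simp [List.isPrefixOf]; exact fun hh => hc hh.symm
            rw [if_neg (by simp [hpre])]
            rw [ih f (c :: cur) (by simpa using Nat.le_of_succ_le_succ h)]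
            simp [hc]

-- the first piece of s.split("_") is the prefix of s before the first '_'
theorem splitOn_head (s : List Char) :
    (PySem.Chars.splitOn s ['_']).head? = some (s.takeWhile (fun c => c != '_')) := by
  unfold PySem.Chars.splitOn
  simpa using splitOnGo_head (s.length + 1) s [] (by omega)

theorem valid_name_alt_eq (name : String) :
    valid_name_alt name =
      String.ofList (((name.toList.dropWhile (· == '_')).takeWhile (fun c => c != '_'))) := by
  set t := name.toList.dropWhile (· == '_') with ht
  have h0 : valid_name_alt name =
      ((PySem.Str.split? (String.ofList t) "_").getD []).headD "" := rfl
  rw [h0]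
  have h1 : PySem.Str.split? (String.ofList t) "_" =
      some ((PySem.Chars.splitOn t ['_']).map String.ofList) := by
    simp [PySem.Str.split?, PySem.Chars.split?]
  rw [h1]
  have h2 := splitOn_head t
  cases h3 : (PySem.Chars.splitOn t ['_']) with
  | nil => simp [h3] at h2
  | cons x xs =>
      rw [h3] at h2
      simp only [List.head?_cons, Option.some.injEq] at h2
      simp [h2]

-- ===== VERDICT (by name: the statement is the Claim_ definition above) =====
theorem valid_name_spec : Claim_equal_valid_name := by
  intro name _
  unfold Spec_valid_name
  rw [valid_name_alt_eq]
  unfold valid_name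
  rw [validNameGo_empty]
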